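-- pv_equiv track=rewrite | github.com/EmiOnGit/advent_of_code_23 | tag4/main.py | part2
-- ===== SOURCE A (Python) =====
-- def part2(input):
--     matches = []
--     for line in input.splitlines():
--         if len(line) == 0:
--             continue
--         # remove 'Card [n]'
--         line = line.split(':')[1]
--         # split at '|' symbol
--         [left, right] = line.split('|')
--         left = [int(x) for x in left.split()]
--         right = [int(x) for x in right.split()]
--         left.sort()
--         right.sort()
--         l_index = 0
--         r_index = 0
--         sum = 0
--         while l_index != len(left) and r_index != len(right):
--             l_current = left[l_index]
--             r_current = right[r_index]
--             if l_current > r_current: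
--                 r_index += 1
--             elif l_current < r_current:
--                 l_index += 1
--             else:
--                 sum += 1
--                 r_index += 1
--                 l_index += 1
--         matches.append(sum)
--     card_count = [1 for x in range(len(matches))]
--     for i in range(len(matches)):
--         count = card_count[i]
--         match = matches[i]
--         for x in range(i+1,i+match+1):
--             if x > len(matches):
--                 break
--             card_count[x] += count
--     sum2 = 0
--     for count in card_count:
--         sum2 += count
--     return(sum2)
-- ===== SOURCE B (Python) =====
-- def part2(input):
--     matches = []
--     for line in input.splitlines():
--         if len(line) == 0:
--             continue
--         body = line.split(':')[1]
--         [left_s, right_s] = body.split('|')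
--         left = [int(x) for x in left_s.split()]
--         right = [int(x) for x in right_s.split()]
--         # count matches by consuming a hash counter of the right side (no sorting, no merge)
--         avail = {}
--         for v in right:
--             avail[v] = avail.get(v, 0) + 1
--         m = 0
--         for v in left:
--             if avail.get(v, 0) > 0:
--                 avail[v] -= 1
--                 m += 1
--         matches.append(m)
--     n = len(matches)
--     counts = [1] * n
--     for i in range(n):
--         for j in range(i + 1, min(i + matches[i] + 1, n)):
--             counts[j] += counts[i]
--     return sum(counts)
-- ===== Notes on version B (the rewrite author's own statement) =====
-- stated objective: alternative
-- what changed: Per-card match counting replaces A's sort-both-sides + two-pointer merge with a one-pass hash counter of the right side consumed while scanning the left side (min-multiplicity intersection), and the cascade loop uses a clamped range instead of A's break-with-off-by-one; A's IndexError inputs are excluded by Pre_.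
import Mathlib
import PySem

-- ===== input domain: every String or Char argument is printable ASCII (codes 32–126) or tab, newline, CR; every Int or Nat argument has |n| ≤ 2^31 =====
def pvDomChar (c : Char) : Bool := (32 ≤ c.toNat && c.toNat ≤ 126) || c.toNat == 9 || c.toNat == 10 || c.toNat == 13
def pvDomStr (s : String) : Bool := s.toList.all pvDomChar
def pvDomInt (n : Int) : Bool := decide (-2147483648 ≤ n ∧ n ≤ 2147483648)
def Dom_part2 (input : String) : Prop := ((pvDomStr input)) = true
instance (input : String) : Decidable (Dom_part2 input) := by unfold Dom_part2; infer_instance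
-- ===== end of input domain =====

-- B replaces A's sort-both-sides + two-pointer merge per card by a one-pass hash counter of the
-- right numbers consumed while scanning the left numbers, and clamps the cascade range instead of
-- A's break; equivalence is proved on Pre_part2 (the inputs where A returns normally).

-- ===== PORT A =====
-- A's while loop: indices step by +1 from 0, so Python's 'l_index != len(left)' guard coincides
-- with '<' on every reachable state; left[l_index]/right[r_index] are then in range.
def part2MergeLoop (left right : List Int) (li ri : Nat) (s : Int) : Int :=
  if h : li < left.length ∧ ri < right.length then
    let lc := left[li]'h.1
    let rc := right[ri]'h.2
    if lc > rc then part2MergeLoop left right li (ri + 1) s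
    else if lc < rc then part2MergeLoop left right (li + 1) ri s
    else part2MergeLoop left right (li + 1) (ri + 1) (s + 1)
  else s
termination_by (left.length - li) + (right.length - ri)
decreasing_by all_goals omega

-- the matches-building loop of A; 'len(line) == 0' is 'line = ""';
-- line.split(':')[1] (IndexError), the [left, right] unpack (ValueError) and int(x) (ValueError)
-- raise on malformed lines — those inputs are excluded by Pre_part2, so the .getD defaults are never hit there
def part2LineVal (line : String) : Int :=
  let body := ((PySem.Str.split? line ":").getD []).getD 1 ""
  let ps := (PySem.Str.split? body "|").getD []
  let left := (PySem.Str.split₀ (ps.getD 0 "")).map (fun t => (PySem.Int.ofStr? t).getD 0)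
  let right := (PySem.Str.split₀ (ps.getD 1 "")).map (fun t => (PySem.Int.ofStr? t).getD 0)
  let left := PySem.List.sorted left (fun x => x) false
  let right := PySem.List.sorted right (fun x => x) false
  part2MergeLoop left right 0 0 0

def part2Matches (input : String) : List Int :=
  (PySem.Str.splitlines input).foldl
    (fun ms line => if line = "" then ms else ms ++ [part2LineVal line]) []

-- A's inner cascade loop with its break; 'card_count[x] += count' raises IndexError at x = len(matches)
-- (the break tests 'x > len', off by one) — excluded by Pre_part2, where pySetD/pyGetD are exact
def part2Inner (n : Int) (count : Int) (cc : List Int) : List Int → List Int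
  | [] => cc
  | x :: rest =>
      if x > n then cc
      else part2Inner n count (PySem.List.pySetD cc x (PySem.List.pyGetD cc x 0 + count)) rest

-- A's cascade loop over the card indices
def part2Cascade (ms : List Int) : List Int :=
  (List.range ms.length).foldl
    (fun cc (i : Nat) =>
      let count := PySem.List.pyGetD cc (i : Int) 0
      let m := PySem.List.pyGetD ms (i : Int) 0
      part2Inner (ms.length : Int) count cc
        (PySem.List.pyRange ((i : Int) + 1) ((i : Int) + m + 1) 1))
    (List.replicate ms.length (1 : Int))

def part2 (input : String) : Int :=
  let ms := part2Matches input
  let cardCount := part2Cascade ms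
  cardCount.foldl (fun s c => s + c) 0

-- ===== PORT B =====
-- Source B: count matches by consuming a hash counter of the right side
def part2AltCount (left right : List Int) : Int :=
  let avail := right.foldl (fun d v => d.insert v (d.getD v 0 + 1)) (PySem.Dict.empty : PySem.Dict Int Int)
  (left.foldl
    (fun (p : PySem.Dict Int Int × Int) v =>
      if p.1.getD v 0 > 0 then (p.1.insert v (p.1.getD v 0 - 1), p.2 + 1) else p)
    (avail, 0)).2

def part2AltLineVal (line : String) : Int :=
  let body := ((PySem.Str.split? line ":").getD []).getD 1 ""
  let ps := (PySem.Str.split? body "|").getD []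
  let left := (PySem.Str.split₀ (ps.getD 0 "")).map (fun t => (PySem.Int.ofStr? t).getD 0)
  let right := (PySem.Str.split₀ (ps.getD 1 "")).map (fun t => (PySem.Int.ofStr? t).getD 0)
  part2AltCount left right

def part2AltMatches (input : String) : List Int :=
  (PySem.Str.splitlines input).foldl
    (fun ms line => if line = "" then ms else ms ++ [part2AltLineVal line]) []

-- Source B's cascade with the clamped range
def part2AltCascade (ms : List Int) : List Int :=
  (List.range ms.length).foldl
    (fun cc (i : Nat) =>
      let m := PySem.List.pyGetD ms (i : Int) 0
      (PySem.List.pyRange ((i : Int) + 1) (min ((i : Int) + m + 1) (ms.length : Int)) 1).foldl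
        (fun cc j => PySem.List.pySetD cc j (PySem.List.pyGetD cc j 0 + PySem.List.pyGetD cc (i : Int) 0))
        cc)
    (List.replicate ms.length (1 : Int))

def part2_alt (input : String) : Int :=
  let ms := part2AltMatches input
  let counts := part2AltCascade ms
  counts.sum

-- ===== PRECONDITION & SPEC =====
-- spec-side helpers (independent of the ports): line well-formedness and the card's match count
-- as the size of the min-multiplicity intersection of the two number lists (List.bagInter)
def pvLineOk (line : String) : Bool :=
  let parts := (PySem.Str.split? line ":").getD []
  decide (2 ≤ parts.length) &&
    (let ps := (PySem.Str.split? (parts.getD 1 "") "|").getD []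
     decide (ps.length = 2) &&
       (PySem.Str.split₀ (ps.getD 0 "")).all (fun t => (PySem.Int.ofStr? t).isSome) &&
       (PySem.Str.split₀ (ps.getD 1 "")).all (fun t => (PySem.Int.ofStr? t).isSome))

def pvMatchCount (line : String) : Nat :=
  let ps := (PySem.Str.split? (((PySem.Str.split? line ":").getD []).getD 1 "") "|").getD []
  let left := (PySem.Str.split₀ (ps.getD 0 "")).map (fun t => (PySem.Int.ofStr? t).getD 0)
  let right := (PySem.Str.split₀ (ps.getD 1 "")).map (fun t => (PySem.Int.ofStr? t).getD 0)
  (left.bagInter right).length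

def pvLines (input : String) : List String :=
  (PySem.Str.splitlines input).filter (fun l => l ≠ "")

-- Pre_ = exactly the inputs on which A returns: every non-empty line is a well-formed card line,
-- and no card's match count reaches past the last card (otherwise A's cascade loop raises IndexError)
def Pre_part2 (input : String) : Prop :=
  (∀ l ∈ pvLines input, pvLineOk l = true) ∧
    ∀ i ∈ List.range (pvLines input).length,
      pvMatchCount ((pvLines input).getD i "") + i + 1 ≤ (pvLines input).length
instance (input : String) : Decidable (Pre_part2 input) := by unfold Pre_part2; infer_instance

def pvWitness_part2 : String := "Card 1: 1 2 | 2 3\nCard 2: 1 | 5"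

def Spec_part2 (input : String) (out : Int) : Prop := out = part2_alt input
instance (input : String) (out : Int) : Decidable (Spec_part2 input out) := by unfold Spec_part2; infer_instance

-- ===== CLAIM (what is proved, stated in full; the proofs are below) =====
def Claim_equal_part2 : Prop := ∀ (input : String), Dom_part2 input → Pre_part2 input → Spec_part2 input (part2 input)
-- ===== LEMMAS AND PROOFS =====

-- elements of a (≤)-sorted list from position i on are at least l[i]
theorem pvHeadLeDrop (l : List Int) (i : Nat) (h : i < l.length)
    (hl : l.Pairwise (· ≤ ·)) : ∀ x ∈ l.drop i, l[i] ≤ x := by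
  intro x hx
  obtain ⟨k, hk, rfl⟩ := List.mem_iff_getElem.1 hx
  have hk' : k < l.length - i := by simpa using hk
  rw [List.getElem_drop]
  rcases Nat.eq_zero_or_pos k with rfl | hp
  · simp
  · exact (List.pairwise_iff_getElem.1 hl) i (i + k) h (by omega) (by omega)

theorem pvInterConsRight {a : Int} (s t : Multiset Int) (h : a ∉ s) :
    s ∩ (a ::ₘ t) = s ∩ t := by
  rw [Multiset.inter_comm, Multiset.cons_inter_of_neg _ h, Multiset.inter_comm]

-- A's two-pointer merge on sorted lists counts the min-multiplicity intersection of the suffixes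
theorem pvMergeLoop_eq (left right : List Int)
    (hl : left.Pairwise (· ≤ ·)) (hr : right.Pairwise (· ≤ ·)) :
    ∀ (n li ri : Nat) (s : Int), (left.length - li) + (right.length - ri) ≤ n →
      part2MergeLoop left right li ri s
        = s + ((((left.drop li : List Int) : Multiset Int) ∩ ((right.drop ri : List Int) : Multiset Int)).card : Int) := by
  intro n
  induction n with
  | zero =>
    intro li ri s h
    rw [part2MergeLoop, dif_neg (by omega)]
    rw [List.drop_eq_nil_of_le (by omega)]
    simp
  | succ n ih =>
    intro li ri s h
    rw [part2MergeLoop]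
    by_cases hg : li < left.length ∧ ri < right.length
    · rw [dif_pos hg]
      by_cases hgt : left[li]'hg.1 > right[ri]'hg.2
      · rw [if_pos hgt, ih li (ri + 1) s (by omega)]
        have hne : (right[ri]'hg.2) ∉ ((left.drop li : List Int) : Multiset Int) := by
          intro hmem
          have := pvHeadLeDrop left li hg.1 hl _ (Multiset.mem_coe.1 hmem)
          omega
        rw [List.drop_eq_getElem_cons hg.2, ← Multiset.cons_coe, pvInterConsRight _ _ hne]
      · rw [if_neg hgt]
        by_cases hlt : left[li]'hg.1 < right[ri]'hg.2
        · rw [if_pos hlt, ih (li + 1) ri s (by omega)]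
          have hne : (left[li]'hg.1) ∉ ((right.drop ri : List Int) : Multiset Int) := by
            intro hmem
            have := pvHeadLeDrop right ri hg.2 hr _ (Multiset.mem_coe.1 hmem)
            omega
          rw [List.drop_eq_getElem_cons hg.1, ← Multiset.cons_coe,
            Multiset.cons_inter_of_neg _ hne]
        · rw [if_neg hlt, ih (li + 1) (ri + 1) (s + 1) (by omega)]
          have heq : left[li]'hg.1 = right[ri]'hg.2 := by omega
          rw [List.drop_eq_getElem_cons hg.1, List.drop_eq_getElem_cons hg.2,
            ← Multiset.cons_coe, ← Multiset.cons_coe, ← heq,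
            Multiset.cons_inter_of_pos _ (Multiset.mem_cons_self _ _),
            Multiset.erase_cons_head, Multiset.card_cons]
          push_cast
          ring
    · rw [dif_neg hg]
      rcases Decidable.not_and_iff_or_not.1 hg with h' | h'
      · rw [List.drop_eq_nil_of_le (as := left) (by omega)]; simp
      · rw [List.drop_eq_nil_of_le (as := right) (by omega)]; simp

-- B's consume loop: scanning L against a counter representing the multiset R
theorem pvConsume_eq (L : List Int) :
    ∀ (d : PySem.Dict Int Int) (R : Multiset Int) (m : Int),
      (∀ v, d.getD v 0 = (R.count v : Int)) →
      (L.foldl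
        (fun (p : PySem.Dict Int Int × Int) v =>
          if p.1.getD v 0 > 0 then (p.1.insert v (p.1.getD v 0 - 1), p.2 + 1) else p)
        (d, m)).2
      = m + (((L : Multiset Int) ∩ R).card : Int) := by
  induction L with
  | nil => intro d R m _; simp
  | cons a l ih =>
    intro d R m hd
    simp only [List.foldl_cons]
    by_cases hmem : a ∈ R
    · have hpos : 0 < R.count a := Multiset.count_pos.2 hmem
      rw [if_pos (by rw [hd a]; exact_mod_cast hpos)]
      rw [ih _ (R.erase a) _ ?_]
      · have hco : ((a :: l : List Int) : Multiset Int) ∩ R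
            = a ::ₘ ((l : Multiset Int) ∩ R.erase a) := by
          rw [← Multiset.cons_coe, Multiset.cons_inter_of_pos _ hmem]
        rw [hco, Multiset.card_cons]
        push_cast
        ring
      · intro v
        rw [PySem.Dict.getD_insert]
        by_cases hv : v = a
        · subst hv
          rw [if_pos rfl, hd v, Multiset.count_erase_self]
          omega
        · rw [if_neg hv, hd v, Multiset.count_erase_of_ne hv]
    · have h0 : R.count a = 0 := Multiset.count_eq_zero.2 hmem
      rw [if_neg (by rw [hd a, h0]; simp)]
      rw [ih _ R _ hd, ← Multiset.cons_coe, Multiset.cons_inter_of_neg _ hmem]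

theorem pvAltCount_eq (L R : List Int) :
    part2AltCount L R = (((L : Multiset Int) ∩ (R : Multiset Int)).card : Int) := by
  unfold part2AltCount
  rw [pvConsume_eq L _ (R : Multiset Int) 0 ?_]
  · ring
  · intro v
    rw [PySem.Dict.getD_foldl_insert_add_one, PySem.Dict.getD_empty, Multiset.coe_count]
    ring

theorem pvMergeTop_eq (L R : List Int) :
    part2MergeLoop (PySem.List.sorted L (fun x => x) false)
        (PySem.List.sorted R (fun x => x) false) 0 0 0
      = (((L : Multiset Int) ∩ (R : Multiset Int)).card : Int) := by
  have hL : ((PySem.List.sorted L (fun x => x) false : List Int) : Multiset Int) = (L : Multiset Int) :=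
    Multiset.coe_eq_coe.2 (PySem.List.sorted_perm L (fun x => x) false)
  have hR : ((PySem.List.sorted R (fun x => x) false : List Int) : Multiset Int) = (R : Multiset Int) :=
    Multiset.coe_eq_coe.2 (PySem.List.sorted_perm R (fun x => x) false)
  rw [pvMergeLoop_eq _ _ (PySem.List.sorted_pairwise L (fun x => x))
      (PySem.List.sorted_pairwise R (fun x => x)) _ 0 0 0 le_rfl]
  simp only [List.drop_zero, hL, hR]
  ring

-- the matches-building folds are map-over-filter
theorem pvFoldMap (g : String → Int) (f : List Int → String → List Int)
    (hf : ∀ acc l, f acc l = if l = "" then acc else acc ++ [g l]) :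
    ∀ (ls : List String) (acc : List Int),
      ls.foldl f acc = acc ++ (ls.filter (fun l => l ≠ "")).map g := by
  intro ls
  induction ls with
  | nil => intro acc; simp
  | cons l t ih =>
    intro acc
    simp only [List.foldl_cons, hf acc l, List.filter_cons]
    by_cases hl : l = ""
    · rw [if_pos hl, ih]
      simp [hl]
    · rw [if_neg hl, ih]
      simp [hl]

theorem pvLineVal_eq (l : String) : part2LineVal l = (pvMatchCount l : Int) := by
  unfold part2LineVal
  rw [pvMergeTop_eq, Multiset.coe_inter, Multiset.coe_card]
  rfl

theorem pvAltLineVal_eq (l : String) : part2AltLineVal l = (pvMatchCount l : Int) := by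
  unfold part2AltLineVal
  rw [pvAltCount_eq, Multiset.coe_inter, Multiset.coe_card]
  rfl

theorem pvMatchesA_eq (input : String) :
    part2Matches input = (pvLines input).map (fun l => (pvMatchCount l : Int)) := by
  unfold part2Matches pvLines
  rw [pvFoldMap part2LineVal _ (fun _ _ => rfl), List.nil_append]
  exact List.map_congr_left (fun l _ => pvLineVal_eq l)

theorem pvMatchesB_eq (input : String) :
    part2AltMatches input = (pvLines input).map (fun l => (pvMatchCount l : Int)) := by
  unfold part2AltMatches pvLines
  rw [pvFoldMap part2AltLineVal _ (fun _ _ => rfl), List.nil_append]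
  exact List.map_congr_left (fun l _ => pvAltLineVal_eq l)

-- B's inner cascade fold keeps the list length
theorem pvFoldSet_length (r : List Int) :
    ∀ (cc : List Int) (i : Int),
      (r.foldl (fun cc j =>
        PySem.List.pySetD cc j (PySem.List.pyGetD cc j 0 + PySem.List.pyGetD cc i 0)) cc).length
      = cc.length := by
  induction r with
  | nil => intro cc i; rfl
  | cons x t ih =>
    intro cc i
    simp only [List.foldl_cons]
    rw [ih, PySem.List.length_pySetD]

-- A's inner loop (break never fires, count is stable) equals B's inner fold
theorem pvInner_eq (r : List Int) :
    ∀ (cc : List Int) (n c i : Int),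
      (cc.length : Int) = n → 0 ≤ i →
      (∀ x ∈ r, i < x ∧ 0 ≤ x ∧ x < n) →
      c = PySem.List.pyGetD cc i 0 →
      part2Inner n c cc r
        = r.foldl (fun cc j =>
            PySem.List.pySetD cc j (PySem.List.pyGetD cc j 0 + PySem.List.pyGetD cc i 0)) cc := by
  induction r with
  | nil => intro cc n c i _ _ _ _; rfl
  | cons x t ih =>
    intro cc n c i hn hi hx hc
    obtain ⟨h1, h2, h3⟩ := hx x (by simp)
    rw [part2Inner, if_neg (by omega)]
    simp only [List.foldl_cons]
    rw [← hc]
    apply ih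
    · rw [PySem.List.length_pySetD]; exact hn
    · exact hi
    · intro y hy; exact hx y (List.mem_cons_of_mem _ hy)
    · have hilt : i < (cc.length : Int) := by omega
      rw [PySem.List.pySetD_of_nonneg _ _ h2,
        PySem.List.pyGetD_eq_getElem _ _ hi (by rw [List.length_set]; omega),
        List.getElem_set_ne (by omega)]
      rw [hc, PySem.List.pyGetD_eq_getElem _ _ hi (by omega)]

-- the outer cascade loops agree index by index
theorem pvOuter_eq (ms : List Int)
    (hms : ∀ i, (h : i < ms.length) → ∃ k : Nat, ms[i] = (k : Int) ∧ k + i + 1 ≤ ms.length) :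
    ∀ (is : List Nat) (cc : List Int), (∀ i ∈ is, i < ms.length) → cc.length = ms.length →
      is.foldl
        (fun cc (i : Nat) =>
          part2Inner (ms.length : Int) (PySem.List.pyGetD cc (i : Int) 0) cc
            (PySem.List.pyRange ((i : Int) + 1) ((i : Int) + PySem.List.pyGetD ms (i : Int) 0 + 1) 1)) cc
      = is.foldl
        (fun cc (i : Nat) =>
          (PySem.List.pyRange ((i : Int) + 1)
            (min ((i : Int) + PySem.List.pyGetD ms (i : Int) 0 + 1) (ms.length : Int)) 1).foldl
            (fun cc j =>
              PySem.List.pySetD cc j (PySem.List.pyGetD cc j 0 + PySem.List.pyGetD cc (i : Int) 0)) cc) cc := by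
  intro is
  induction is with
  | nil => intro cc _ _; rfl
  | cons i t ih =>
    intro cc hmem hcc
    have hi : i < ms.length := hmem i (by simp)
    obtain ⟨k, hk, hkb⟩ := hms i hi
    have hm : PySem.List.pyGetD ms (i : Int) 0 = (k : Int) := by
      rw [PySem.List.pyGetD_natCast, List.getD_eq_getElem?_getD, List.getElem?_eq_getElem hi]
      simpa using hk
    simp only [List.foldl_cons]
    have hmin : min ((i : Int) + PySem.List.pyGetD ms (i : Int) 0 + 1) (ms.length : Int)
        = (i : Int) + PySem.List.pyGetD ms (i : Int) 0 + 1 := by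
      rw [hm]; apply min_eq_left; omega
    rw [hmin]
    rw [pvInner_eq _ cc (ms.length : Int) _ (i : Int) (by rw [hcc]) (by exact Int.natCast_nonneg i) ?_ rfl]
    · apply ih
      · intro y hy; exact hmem y (List.mem_cons_of_mem _ hy)
      · rw [pvFoldSet_length, hcc]
    · intro x hxm
      rw [PySem.List.mem_pyRange_one] at hxm
      rw [hm] at hxm
      refine ⟨by omega, by omega, ?_⟩
      have : x < (i : Int) + (k : Int) + 1 := hxm.2
      omega

theorem pvCascade_eq (ms : List Int)
    (hms : ∀ i, (h : i < ms.length) → ∃ k : Nat, ms[i] = (k : Int) ∧ k + i + 1 ≤ ms.length) :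
    part2Cascade ms = part2AltCascade ms := by
  unfold part2Cascade part2AltCascade
  exact pvOuter_eq ms hms (List.range ms.length) _
    (fun i hi => List.mem_range.1 hi) (List.length_replicate)

-- ms as produced by the matches fold satisfies the cascade bound under Pre_
theorem pvBound (input : String) (hpre : Pre_part2 input) :
    ∀ i, (h : i < ((pvLines input).map (fun l => (pvMatchCount l : Int))).length) →
      ∃ k : Nat, ((pvLines input).map (fun l => (pvMatchCount l : Int)))[i] = (k : Int) ∧
        k + i + 1 ≤ ((pvLines input).map (fun l => (pvMatchCount l : Int))).length := by
  intro i h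
  have hi : i < (pvLines input).length := by rw [List.length_map] at h; exact h
  refine ⟨pvMatchCount ((pvLines input)[i]), ?_, ?_⟩
  · rw [List.getElem_map]
  · have := hpre.2 i (List.mem_range.2 hi)
    rw [List.getD_eq_getElem?_getD, List.getElem?_eq_getElem hi, Option.getD_some] at this
    rw [List.length_map]
    exact this

-- ===== VERDICT (by name: the statement is the Claim_ definition above) =====
theorem part2_spec : Claim_equal_part2 := by
  intro input _ hpre
  unfold Spec_part2
  show (part2Cascade (part2Matches input)).foldl (fun s c => s + c) 0
      = (part2AltCascade (part2AltMatches input)).sum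
  rw [pvMatchesA_eq, pvMatchesB_eq, List.sum_eq_foldl, pvCascade_eq _ (pvBound input hpre)]
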